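-- pv_equiv track=rewrite | github.com/springli07/Class-table-ics-generate | course_dialog.py | format_weeks
-- ===== SOURCE A (Python) =====
-- def format_weeks(weeks):
--     """将周数列表格式化为字符串"""
--     if not weeks:
--         return ""
--     weeks = sorted(weeks)
--     result = []
--     start = weeks[0]
--     prev = start
--
--     for week in weeks[1:]:
--         if week != prev + 1:
--             if start == prev:
--                 result.append(str(start))
--             else:
--                 result.append(f"{start}-{prev}")
--             start = week
--         prev = week
--
--     if start == prev:
--         result.append(str(start))
--     else:
--         result.append(f"{start}-{prev}")
--
--     return ",".join(result)
-- ===== SOURCE B (Python) =====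
-- from itertools import groupby
--
-- def format_weeks(weeks):
--     """将周数列表格式化为字符串"""
--     pieces = []
--     for _, grp in groupby(enumerate(sorted(weeks)), key=lambda pair: pair[1] - pair[0]):
--         run = [w for _, w in grp]
--         pieces.append(str(run[0]) if len(run) == 1 else f"{run[0]}-{run[-1]}")
--     return ",".join(pieces)
-- ===== Notes on version B (the rewrite author's own statement) =====
-- stated objective: idiomatic
-- what changed: Replaces the hand-rolled start/prev state machine with the standard itertools.groupby idiom: group enumerate(sorted(weeks)) by value-minus-index so each maximal consecutive run becomes one group, then format each group directly.
import Mathlib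
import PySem

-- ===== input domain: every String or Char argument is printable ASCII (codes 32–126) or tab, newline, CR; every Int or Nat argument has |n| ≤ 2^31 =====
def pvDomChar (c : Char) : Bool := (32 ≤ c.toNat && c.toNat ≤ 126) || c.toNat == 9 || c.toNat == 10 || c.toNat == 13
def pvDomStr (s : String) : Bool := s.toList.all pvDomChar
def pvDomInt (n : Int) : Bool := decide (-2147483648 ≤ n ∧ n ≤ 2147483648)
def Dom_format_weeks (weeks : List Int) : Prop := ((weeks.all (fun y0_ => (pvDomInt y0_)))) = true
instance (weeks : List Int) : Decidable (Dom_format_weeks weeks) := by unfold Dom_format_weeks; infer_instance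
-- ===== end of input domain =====

-- B replaces A's hand-rolled start/prev state machine by the itertools.groupby idiom
-- (group enumerate(sorted) by value-minus-index); same complexity, more idiomatic.

-- ===== PORT A =====
-- the segment str(start) / f"{start}-{prev}" appended by A
def fwSeg (start prev : Int) : String :=
  if start = prev then PySem.Int.toStr start
  else PySem.Int.toStr start ++ "-" ++ PySem.Int.toStr prev

-- A's for-loop over weeks[1:] with state (result, start, prev), as structural recursion
def fwLoop (result : List String) (start prev : Int) : List Int → List String × Int × Int
  | [] => (result, start, prev)
  | week :: rest =>
      if week ≠ prev + 1 then fwLoop (result ++ [fwSeg start prev]) week week rest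
      else fwLoop result start week rest

def format_weeks (weeks : List Int) : String :=
  match PySem.List.sorted weeks (fun x => x) false with
  | [] => ""   -- 'if not weeks: return ""' (weeks empty iff sorted weeks empty)
  | w0 :: tail =>
      let (result, start, prev) := fwLoop [] w0 w0 tail
      PySem.Str.join "," (result ++ [fwSeg start prev])

-- ===== PORT B =====
-- groupby(enumerate(sorted(weeks)), key=pair[1]-pair[0]): consecutive pairs share the key
-- iff the next value is prev+1, so the groups are exactly the maximal consecutive runs;
-- splitRun/groupRuns transcribe that grouping (exact for this key).
def splitRun (prev : Int) : List Int → List Int × List Int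
  | [] => ([], [])
  | x :: rest =>
      if x = prev + 1 then (x :: (splitRun x rest).1, (splitRun x rest).2)
      else ([], x :: rest)

theorem splitRun_snd_len (prev : Int) (xs : List Int) :
    (splitRun prev xs).2.length ≤ xs.length := by
  induction xs generalizing prev with
  | nil => simp [splitRun]
  | cons x rest ih =>
      simp only [splitRun]
      split
      · exact le_trans (ih x) (Nat.le_succ _)
      · simp

def groupRuns : List Int → List (List Int)
  | [] => []
  | x :: rest => (x :: (splitRun x rest).1) :: groupRuns (splitRun x rest).2
termination_by xs => xs.length
decreasing_by
  simpa using Nat.lt_succ_of_le (splitRun_snd_len x rest)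

-- str(run[0]) if len(run)==1 else f"{run[0]}-{run[-1]}"
def fwPiece : List Int → String
  | [] => ""   -- unreachable: groups are nonempty
  | g@(x :: _) =>
      if g.length = 1 then PySem.Int.toStr x
      else PySem.Int.toStr x ++ "-" ++ PySem.Int.toStr (g.getLastD 0)

def format_weeks_alt (weeks : List Int) : String :=
  PySem.Str.join "," ((groupRuns (PySem.List.sorted weeks (fun x => x) false)).map fwPiece)

-- ===== PRECONDITION & SPEC =====
def Spec_format_weeks (weeks : List Int) (out : String) : Prop := out = format_weeks_alt weeks
instance (weeks : List Int) (out : String) : Decidable (Spec_format_weeks weeks out) := by unfold Spec_format_weeks; infer_instance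

-- ===== CLAIM (what is proved, stated in full; the proofs are below) =====
def Claim_equal_format_weeks : Prop := ∀ (weeks : List Int), Dom_format_weeks weeks → Spec_format_weeks weeks (format_weeks weeks)

-- ===== LEMMAS AND PROOFS =====

theorem groupRuns_nil : groupRuns [] = [] := by rw [groupRuns.eq_def]

theorem groupRuns_cons (x : Int) (rest : List Int) :
    groupRuns (x :: rest) = (x :: (splitRun x rest).1) :: groupRuns (splitRun x rest).2 := by
  rw [groupRuns.eq_def]

theorem splitRun_succ (prev : Int) (rest : List Int) :
    splitRun prev ((prev + 1) :: rest)
      = ((prev + 1) :: (splitRun (prev + 1) rest).1, (splitRun (prev + 1) rest).2) := by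
  simp [splitRun]

theorem splitRun_ne {w prev : Int} (rest : List Int) (hw : w ≠ prev + 1) :
    splitRun prev (w :: rest) = ([], w :: rest) := by
  simp [splitRun, hw]

-- the finalization A performs after its loop
def fwFinish (s : List String × Int × Int) : List String := s.1 ++ [fwSeg s.2.1 s.2.2]

-- A's loop with final segment, flattened to the list of segments it emits
def fwSegs (start prev : Int) : List Int → List String
  | [] => [fwSeg start prev]
  | week :: rest =>
      if week ≠ prev + 1 then fwSeg start prev :: fwSegs week week rest
      else fwSegs start week rest

theorem fwLoop_eq_segs (result : List String) (start prev : Int) (xs : List Int) :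
    fwFinish (fwLoop result start prev xs) = result ++ fwSegs start prev xs := by
  induction xs generalizing result start prev with
  | nil => simp [fwLoop, fwSegs, fwFinish]
  | cons w rest ih =>
      simp only [fwLoop, fwSegs]
      split
      · rw [ih]; simp
      · rw [ih]

theorem splitRun_getLast (prev : Int) (xs : List Int) :
    ((splitRun prev xs).1).getLastD prev = prev + (splitRun prev xs).1.length := by
  induction xs generalizing prev with
  | nil => simp [splitRun]
  | cons x rest ih =>
      by_cases hx : x = prev + 1
      · subst hx
        rw [splitRun_succ]
        simp only [List.getLastD_cons, ih, List.length_cons]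
        push_cast; ring
      · rw [splitRun_ne rest hx]; simp

-- B's piece of a maximal run equals A's segment for it
theorem piece_eq_seg (w : Int) (rest : List Int) :
    fwPiece (w :: (splitRun w rest).1) = fwSeg w (((splitRun w rest).1).getLastD w) := by
  have hl := splitRun_getLast w rest
  cases hr : (splitRun w rest).1 with
  | nil => simp [fwPiece, fwSeg]
  | cons a as =>
      rw [hr] at hl
      have hne : w ≠ (a :: as).getLastD w := by
        rw [hl]; intro h
        simp only [List.length_cons] at h
        push_cast at h; omega
      have hgl : (w :: a :: as).getLastD 0 = (a :: as).getLastD w := by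
        rw [List.getLastD_cons]
      simp only [fwPiece, fwSeg, List.length_cons, hgl]
      rw [if_neg (by simp), if_neg hne]

-- the heart: A's segment stream equals B's per-run pieces
theorem segs_eq_pieces (xs : List Int) : ∀ start prev,
    fwSegs start prev xs
      = (fwSeg start (((splitRun prev xs).1).getLastD prev))
          :: (groupRuns (splitRun prev xs).2).map fwPiece := by
  induction xs with
  | nil => intro start prev; simp [fwSegs, splitRun, groupRuns_nil]
  | cons w rest ih =>
      intro start prev
      by_cases hw : w = prev + 1
      · -- continues the run
        subst hw
        rw [splitRun_succ]
        simp only [fwSegs, ne_eq, not_true_eq_false, if_false]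
        rw [ih start (prev + 1)]
        cases (splitRun (prev + 1) rest).1 with
        | nil => simp
        | cons b bs =>
            cases h2 : (b :: bs).getLast? with
            | none => simp [List.getLast?_eq_none_iff] at h2
            | some v => simp [h2]
      · -- run breaks here
        rw [splitRun_ne rest hw]
        simp only [fwSegs, ne_eq, hw, not_false_eq_true, if_true]
        rw [ih w w, groupRuns_cons]
        simp [piece_eq_seg]

-- ===== VERDICT (by name: the statement is the Claim_ definition above) =====
theorem format_weeks_spec : Claim_equal_format_weeks := by
  intro weeks _
  unfold Spec_format_weeks format_weeks format_weeks_alt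
  cases hs : PySem.List.sorted weeks (fun x => x) false with
  | nil => rw [groupRuns_nil]; rfl
  | cons w0 tail =>
      have h1 := fwLoop_eq_segs [] w0 w0 tail
      unfold fwFinish at h1
      simp only [List.nil_append] at h1
      simp only
      rw [h1, segs_eq_pieces tail w0 w0, groupRuns_cons, List.map_cons, piece_eq_seg]
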